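-- pv_equiv track=rewrite | github.com/acjbizar/distribution | tools/generate-templates.py | _codepoints_to_ranges
-- ===== SOURCE A (Python) =====
-- from typing import Any, Dict, List, Tuple
--
-- def _codepoints_to_ranges(codepoints: List[int]) -> List[List[int]]:
--     if not codepoints:
--         return []
--
--     cps = sorted(set(codepoints))
--     ranges: List[List[int]] = []
--
--     start = prev = cps[0]
--     for cp in cps[1:]:
--         if cp == prev + 1:
--             prev = cp
--             continue
--         ranges.append([start, prev])
--         start = prev = cp
--     ranges.append([start, prev])
--
--     return ranges
-- ===== SOURCE B (Python) =====
-- def _codepoints_to_ranges(codepoints):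
--     # Boundary detection via set membership: x starts a range iff x-1 is not
--     # present, ends one iff x+1 is not present; pair them up in sorted order.
--     s = set(codepoints)
--     starts = sorted(x for x in s if x - 1 not in s)
--     ends = sorted(x for x in s if x + 1 not in s)
--     return [[a, b] for a, b in zip(starts, ends)]
-- ===== Notes on version B (the rewrite author's own statement) =====
-- stated objective: alternative
-- what changed: Replaces the sorted-scan with start/prev accumulator by set-membership boundary detection: range starts are elements x with x-1 not in the set, range ends those with x+1 absent, zipped in sorted order.
import Mathlib
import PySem

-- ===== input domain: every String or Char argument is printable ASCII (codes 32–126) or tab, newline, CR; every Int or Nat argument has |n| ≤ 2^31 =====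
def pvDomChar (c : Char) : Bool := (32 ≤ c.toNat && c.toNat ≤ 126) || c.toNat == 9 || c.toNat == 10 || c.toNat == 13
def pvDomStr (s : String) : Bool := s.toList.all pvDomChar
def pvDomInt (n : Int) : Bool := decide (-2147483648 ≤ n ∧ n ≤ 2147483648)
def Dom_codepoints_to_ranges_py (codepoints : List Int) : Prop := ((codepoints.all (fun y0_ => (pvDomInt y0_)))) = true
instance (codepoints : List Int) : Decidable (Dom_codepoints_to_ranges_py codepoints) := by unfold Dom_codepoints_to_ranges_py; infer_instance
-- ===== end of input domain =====

-- B replaces A's sorted-scan accumulator loop by set-membership boundary detection (alternative algorithm, same asymptotic cost).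

-- ===== PORT A =====
-- the loop of A: start = prev = cps[0]; for cp in cps[1:]: …; ranges.append([start, prev])
def pvLoopA (cps : List Int) : List (List Int) :=
  match cps with
  | [] => []  -- unreachable under A's guard: cps is nonempty there
  | c0 :: rest =>
    let st := rest.foldl
      (fun (acc : Int × Int × List (List Int)) cp =>
        if cp = acc.2.1 + 1 then (acc.1, cp, acc.2.2)
        else (cp, cp, acc.2.2 ++ [[acc.1, acc.2.1]]))
      (c0, c0, [])
    st.2.2 ++ [[st.1, st.2.1]]

def codepoints_to_ranges_py (codepoints : List Int) : List (List Int) :=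
  if codepoints = [] then []
  else pvLoopA (PySem.List.sorted (PySem.Set.ofList codepoints) (fun x => x) false)

-- ===== PORT B =====
def codepoints_to_ranges_py_alt (codepoints : List Int) : List (List Int) :=
  ((PySem.List.sorted
      ((PySem.Set.ofList codepoints).filter
        (fun x => !(PySem.Set.contains (PySem.Set.ofList codepoints) (x - 1)))) (fun x => x) false).zip
   (PySem.List.sorted
      ((PySem.Set.ofList codepoints).filter
        (fun x => !(PySem.Set.contains (PySem.Set.ofList codepoints) (x + 1)))) (fun x => x) false)).map
    (fun ab => [ab.1, ab.2])

-- ===== PRECONDITION & SPEC =====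
def Spec_codepoints_to_ranges_py (codepoints : List Int) (out : List (List Int)) : Prop := out = codepoints_to_ranges_py_alt codepoints
instance (codepoints : List Int) (out : List (List Int)) : Decidable (Spec_codepoints_to_ranges_py codepoints out) := by unfold Spec_codepoints_to_ranges_py; infer_instance

-- ===== CLAIM (what is proved, stated in full; the proofs are below) =====
def Claim_equal_codepoints_to_ranges_py : Prop := ∀ (codepoints : List Int), Dom_codepoints_to_ranges_py codepoints → Spec_codepoints_to_ranges_py codepoints (codepoints_to_ranges_py codepoints)

-- ===== LEMMAS AND PROOFS =====

/-- Right-recursive description of A's scan: current open run starts at `s`, last seen is `p`. -/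
def pvSpec (s p : Int) : List Int → List (List Int)
  | [] => [[s, p]]
  | c :: t => if c = p + 1 then pvSpec s c t else [s, p] :: pvSpec c c t

lemma pv_fold_spec (t : List Int) : ∀ (s p : Int) (acc : List (List Int)),
    (let st := t.foldl
        (fun (acc : Int × Int × List (List Int)) cp =>
          if cp = acc.2.1 + 1 then (acc.1, cp, acc.2.2)
          else (cp, cp, acc.2.2 ++ [[acc.1, acc.2.1]]))
        (s, p, acc)
     st.2.2 ++ [[st.1, st.2.1]]) = acc ++ pvSpec s p t := by
  induction t with
  | nil => intro s p acc; simp [pvSpec]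
  | cons c t ih =>
    intro s p acc
    simp only [List.foldl_cons, pvSpec]
    by_cases h : c = p + 1
    · simp [h, ih]
    · simp [h, ih]

lemma pv_filter_cons_mem {p : Int → Prop} [DecidablePred p] {a : Int} (l : List Int) (h : p a) :
    List.filter (fun x => !decide (p x)) (a :: l) = List.filter (fun x => !decide (p x)) l := by
  simp [h]

lemma pv_filter_cons_not_mem {p : Int → Prop} [DecidablePred p] {a : Int} (l : List Int) (h : ¬ p a) :
    List.filter (fun x => !decide (p x)) (a :: l) = a :: List.filter (fun x => !decide (p x)) l := by
  simp [h]

lemma pv_filter_congr {p q : Int → Prop} [DecidablePred p] [DecidablePred q] (l : List Int)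
    (h : ∀ x ∈ l, p x ↔ q x) :
    List.filter (fun x => !decide (p x)) l = List.filter (fun x => !decide (q x)) l :=
  List.filter_congr (fun x hx => by simp [h x hx])

/-- Main lemma: on a strictly increasing list, A's scan equals the boundary zip. -/
lemma pv_main (t : List Int) : ∀ (s p : Int), (p :: t).Pairwise (· < ·) →
    pvSpec s p t =
      ((s :: t.filter (fun x => !decide ((x - 1) ∈ p :: t))).zip
        ((p :: t).filter (fun x => !decide ((x + 1) ∈ p :: t)))).map
        (fun ab => [ab.1, ab.2]) := by
  induction t with
  | nil =>
    intro s p _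
    have hp1 : ¬ ((p + 1 : Int) ∈ [p]) := by intro hm; rcases List.mem_singleton.mp hm with h; omega
    rw [pv_filter_cons_not_mem (p := fun x => (x + 1 : Int) ∈ [p]) (a := p) ([] : List Int) hp1]
    simp [pvSpec]
  | cons c t ih =>
    intro s p hpw
    have hpc : p < c := (List.pairwise_cons.1 hpw).1 c (by simp)
    have hct : ∀ x ∈ t, c < x :=
      fun x hx => (List.pairwise_cons.1 (List.pairwise_cons.1 hpw).2).1 x hx
    have htail : (c :: t).Pairwise (· < ·) := (List.pairwise_cons.1 hpw).2
    by_cases h : c = p + 1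
    · -- run continues: c is not a start, p is not an end
      have e1 : List.filter (fun x => !decide ((x - 1) ∈ p :: c :: t)) (c :: t)
          = List.filter (fun x => !decide ((x - 1) ∈ c :: t)) t := by
        rw [pv_filter_cons_mem (p := fun x => (x - 1 : Int) ∈ p :: c :: t) (a := c) t
          (List.mem_cons.mpr (Or.inl (by omega)))]
        exact pv_filter_congr t (fun x hx => by
          have hcx := hct x hx
          constructor
          · intro hm
            rcases List.mem_cons.mp hm with h1 | h1
            · exfalso; omega
            · exact h1
          · exact fun hm => List.mem_cons.mpr (Or.inr hm))
      have e2 : List.filter (fun x => !decide ((x + 1) ∈ p :: c :: t)) (p :: c :: t)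
          = List.filter (fun x => !decide ((x + 1) ∈ c :: t)) (c :: t) := by
        rw [pv_filter_cons_mem (p := fun x => (x + 1 : Int) ∈ p :: c :: t) (a := p) (c :: t)
          (List.mem_cons.mpr (Or.inr (List.mem_cons.mpr (Or.inl (by omega)))))]
        exact pv_filter_congr (c :: t) (fun x hx => by
          have hxc : c ≤ x := by
            rcases List.mem_cons.mp hx with h1 | h1
            · omega
            · exact le_of_lt (hct x h1)
          constructor
          · intro hm
            rcases List.mem_cons.mp hm with h1 | h1
            · exfalso; omega
            · exact h1
          · exact fun hm => List.mem_cons.mpr (Or.inr hm))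
      simp only [pvSpec, if_pos h]
      rw [e1, e2]
      exact ih s c htail
    · -- gap: c starts a new range, p ends the old one
      have hgap : p + 1 < c := by omega
      have hc1 : ¬ ((c - 1 : Int) ∈ p :: c :: t) := by
        intro hm
        rcases List.mem_cons.mp hm with h1 | h1
        · omega
        · rcases List.mem_cons.mp h1 with h2 | h2
          · omega
          · have := hct _ h2; omega
      have hp1 : ¬ ((p + 1 : Int) ∈ p :: c :: t) := by
        intro hm
        rcases List.mem_cons.mp hm with h1 | h1
        · omega
        · rcases List.mem_cons.mp h1 with h2 | h2
          · omega
          · have := hct _ h2; omega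
      have e1t : List.filter (fun x => !decide ((x - 1) ∈ p :: c :: t)) t
          = List.filter (fun x => !decide ((x - 1) ∈ c :: t)) t := by
        exact pv_filter_congr t (fun x hx => by
          have hcx := hct x hx
          constructor
          · intro hm
            rcases List.mem_cons.mp hm with h1 | h1
            · exfalso; omega
            · exact h1
          · exact fun hm => List.mem_cons.mpr (Or.inr hm))
      have e1 : List.filter (fun x => !decide ((x - 1) ∈ p :: c :: t)) (c :: t)
          = c :: List.filter (fun x => !decide ((x - 1) ∈ c :: t)) t := by
        rw [pv_filter_cons_not_mem (p := fun x => (x - 1 : Int) ∈ p :: c :: t) (a := c) t hc1, e1t]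
      have e2ct : List.filter (fun x => !decide ((x + 1) ∈ p :: c :: t)) (c :: t)
          = List.filter (fun x => !decide ((x + 1) ∈ c :: t)) (c :: t) := by
        exact pv_filter_congr (c :: t) (fun x hx => by
          have hxc : c ≤ x := by
            rcases List.mem_cons.mp hx with h1 | h1
            · omega
            · exact le_of_lt (hct x h1)
          constructor
          · intro hm
            rcases List.mem_cons.mp hm with h1 | h1
            · exfalso; omega
            · exact h1
          · exact fun hm => List.mem_cons.mpr (Or.inr hm))
      have e2 : List.filter (fun x => !decide ((x + 1) ∈ p :: c :: t)) (p :: c :: t)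
          = p :: List.filter (fun x => !decide ((x + 1) ∈ c :: t)) (c :: t) := by
        rw [pv_filter_cons_not_mem (p := fun x => (x + 1 : Int) ∈ p :: c :: t) (a := p) (c :: t) hp1, e2ct]
      simp only [pvSpec, if_neg h]
      rw [e1, e2, List.zip_cons_cons, List.map_cons, ih c c htail]

lemma pv_sorted_filter (codepoints : List Int) (q : Int → Bool) :
    PySem.List.sorted ((PySem.Set.ofList codepoints).filter q) (fun x => x) false
      = (PySem.List.sorted (PySem.Set.ofList codepoints) (fun x => x) false).filter q := by
  apply PySem.List.sorted_eq_of_perm_of_pairwise_lt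
  · exact (PySem.List.sorted_perm _ _ _).filter q
  · exact (PySem.List.sorted_ofList_pairwise_lt codepoints).sublist List.filter_sublist

lemma pv_bool_ext {a b : Bool} (h : a = true ↔ b = true) : a = b := by
  cases a <;> cases b <;> simp_all

-- ===== VERDICT (by name: the statement is the Claim_ definition above) =====
theorem codepoints_to_ranges_py_spec : Claim_equal_codepoints_to_ranges_py := by
  intro codepoints _
  unfold Spec_codepoints_to_ranges_py codepoints_to_ranges_py codepoints_to_ranges_py_alt
  by_cases hnil : codepoints = []
  · subst hnil; decide
  · rw [if_neg hnil, pv_sorted_filter, pv_sorted_filter]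
    have hpw : (PySem.List.sorted (PySem.Set.ofList codepoints) (fun x => x) false).Pairwise (· < ·) :=
      PySem.List.sorted_ofList_pairwise_lt codepoints
    have hlne : PySem.List.sorted (PySem.Set.ofList codepoints) (fun x => x) false ≠ [] := by
      rw [Ne, PySem.List.sorted_eq_nil_iff]
      intro h
      rcases List.exists_cons_of_ne_nil hnil with ⟨a, as, ha⟩
      have : a ∈ (PySem.Set.ofList codepoints : List Int) :=
        (PySem.Set.mem_ofList _ _).mpr (by rw [ha]; exact List.mem_cons_self ..)
      rw [h] at this
      simp at this
    obtain ⟨c0, rest, hml⟩ := List.exists_cons_of_ne_nil hlne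
    rw [hml] at hpw ⊢
    have hmem : ∀ y : Int,
        (!(PySem.Set.contains (PySem.Set.ofList codepoints) y)) = (!decide (y ∈ c0 :: rest)) := by
      intro y
      have hiff : y ∈ (PySem.Set.ofList codepoints : List Int) ↔ y ∈ c0 :: rest := by
        rw [← hml]
        exact ((PySem.List.sorted_perm _ _ _).mem_iff).symm
      exact congrArg (fun b => !b) (pv_bool_ext (by
        rw [PySem.Set.contains_iff _ _, decide_eq_true_iff]; exact hiff))
    have hf1 : List.filter (fun x => !(PySem.Set.contains (PySem.Set.ofList codepoints) (x - 1))) (c0 :: rest)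
        = List.filter (fun x => !decide ((x - 1) ∈ c0 :: rest)) (c0 :: rest) :=
      List.filter_congr (fun x _ => hmem (x - 1))
    have hf2 : List.filter (fun x => !(PySem.Set.contains (PySem.Set.ofList codepoints) (x + 1))) (c0 :: rest)
        = List.filter (fun x => !decide ((x + 1) ∈ c0 :: rest)) (c0 :: rest) :=
      List.filter_congr (fun x _ => hmem (x + 1))
    rw [hf1, hf2]
    have hc0 : ¬ ((c0 - 1 : Int) ∈ c0 :: rest) := by
      intro hm
      rcases List.mem_cons.mp hm with h1 | h1
      · omega
      · have := (List.pairwise_cons.1 hpw).1 _ h1; omega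
    rw [pv_filter_cons_not_mem (p := fun x => (x - 1 : Int) ∈ c0 :: rest) (a := c0) rest hc0]
    simp only [pvLoopA]
    rw [pv_fold_spec]
    simp only [List.nil_append]
    exact pv_main rest c0 c0 hpw
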